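-- pv_equiv track=rewrite | github.com/ubi-micro-dev/ubi-micro-dev | report.py | reference_sort
-- ===== SOURCE A (Python) =====
-- def reference_sort(r1, r2):
--     """Order references by preference."""
--     patterns = [
--         "access.redhat.com/security/cve",
--         "access.redhat.com/errata",
--         "nist.gov",
--         "cve.org",
--         "bugzilla.redhat",
--         "bugzilla",
--         "fedora"
--     ]
--
--     for pattern in patterns:
--         if pattern in r1 and pattern not in r2:
--             return -1
--         if pattern not in r1 and pattern in r2:
--             return 1
--
--     return -1 if r1 < r2 else 1
-- ===== SOURCE B (Python) =====
-- def reference_sort(r1, r2):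
--     """Order references by preference."""
--     patterns = [
--         "access.redhat.com/security/cve",
--         "access.redhat.com/errata",
--         "nist.gov",
--         "cve.org",
--         "bugzilla.redhat",
--         "bugzilla",
--         "fedora"
--     ]
--
--     def score(r):
--         s = 0
--         for p in patterns:
--             s = 2 * s + (p in r)
--         return s
--
--     s1, s2 = score(r1), score(r2)
--     if s1 != s2:
--         return -1 if s1 > s2 else 1
--     return -1 if r1 < r2 else 1
-- ===== Notes on version B (the rewrite author's own statement) =====
-- stated objective: alternative
-- what changed: B condenses each string's pattern memberships into one integer bitmask (higher-priority pattern = more significant bit) and decides with a single arithmetic comparison of the two scores, instead of A's pattern-by-pattern early-return comparison loop.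
import Mathlib
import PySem

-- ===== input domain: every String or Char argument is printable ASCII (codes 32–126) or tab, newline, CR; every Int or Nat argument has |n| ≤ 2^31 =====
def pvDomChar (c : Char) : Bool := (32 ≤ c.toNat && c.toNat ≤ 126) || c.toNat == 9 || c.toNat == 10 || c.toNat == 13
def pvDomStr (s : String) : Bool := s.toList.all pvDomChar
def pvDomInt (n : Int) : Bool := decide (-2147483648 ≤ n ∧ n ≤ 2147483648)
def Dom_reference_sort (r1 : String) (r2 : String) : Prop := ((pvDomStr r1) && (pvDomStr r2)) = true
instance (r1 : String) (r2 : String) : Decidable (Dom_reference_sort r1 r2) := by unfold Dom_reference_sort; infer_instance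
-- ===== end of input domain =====

-- B replaces A's pattern-by-pattern early-return comparison loop by a per-string integer
-- bitmask score (one arithmetic comparison) — objective: alternative decomposition.

-- ===== PORT A =====
def refPatterns : List String :=
  ["access.redhat.com/security/cve", "access.redhat.com/errata", "nist.gov",
   "cve.org", "bugzilla.redhat", "bugzilla", "fedora"]

-- A's for-loop over the patterns with early returns, then the tiebreaker.
def refLoop : List String → String → String → Int
  | [], r1, r2 => if r1 < r2 then -1 else 1
  | p :: ps, r1, r2 =>
    if PySem.Str.isIn p r1 && !(PySem.Str.isIn p r2) then -1
    else if !(PySem.Str.isIn p r1) && PySem.Str.isIn p r2 then 1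
    else refLoop ps r1 r2

def reference_sort (r1 : String) (r2 : String) : Int := refLoop refPatterns r1 r2

-- ===== PORT B =====
-- score(r): the accumulator loop  s = 2*s + (p in r)  over the patterns.
def refScore (r : String) : Int :=
  refPatterns.foldl (fun s p => 2 * s + (if PySem.Str.isIn p r then 1 else 0)) 0

def reference_sort_alt (r1 : String) (r2 : String) : Int :=
  let s1 := refScore r1
  let s2 := refScore r2
  if s1 ≠ s2 then (if s1 > s2 then -1 else 1)
  else if r1 < r2 then -1 else 1

-- ===== PRECONDITION & SPEC =====
def Spec_reference_sort (r1 : String) (r2 : String) (out : Int) : Prop := out = reference_sort_alt r1 r2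
instance (r1 : String) (r2 : String) (out : Int) : Decidable (Spec_reference_sort r1 r2 out) := by unfold Spec_reference_sort; infer_instance

-- ===== CLAIM (what is proved, stated in full; the proofs are below) =====
def Claim_equal_reference_sort : Prop := ∀ (r1 : String) (r2 : String), Dom_reference_sort r1 r2 → Spec_reference_sort r1 r2 (reference_sort r1 r2)

-- ===== LEMMAS AND PROOFS =====

-- msb-first value of the membership bits of r over a pattern list
def refVal : List String → String → Int
  | [], _ => 0
  | p :: ps, r => (if PySem.Str.isIn p r then (1 : Int) else 0) * 2 ^ ps.length + refVal ps r

theorem refVal_bound (ps : List String) (r : String) :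
    0 ≤ refVal ps r ∧ refVal ps r < 2 ^ ps.length := by
  induction ps with
  | nil => simp [refVal]
  | cons p ps ih =>
    have h2 : (0 : Int) < 2 ^ ps.length := by positivity
    simp only [refVal, List.length_cons, pow_succ]
    split_ifs <;> omega

theorem foldl_refVal (ps : List String) (r : String) (s : Int) :
    ps.foldl (fun s p => 2 * s + (if PySem.Str.isIn p r then 1 else 0)) s
      = s * 2 ^ ps.length + refVal ps r := by
  induction ps generalizing s with
  | nil => simp [refVal]
  | cons p ps ih =>
    simp only [List.foldl_cons, refVal, List.length_cons, pow_succ]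
    rw [ih]
    ring

theorem refLoop_eq_val (ps : List String) (r1 r2 : String) :
    refLoop ps r1 r2 =
      (if refVal ps r1 ≠ refVal ps r2 then (if refVal ps r1 > refVal ps r2 then -1 else 1)
       else if r1 < r2 then -1 else 1) := by
  induction ps with
  | nil => simp [refLoop, refVal]
  | cons p ps ih =>
    obtain ⟨b1a, b1b⟩ := refVal_bound ps r1
    obtain ⟨b2a, b2b⟩ := refVal_bound ps r2
    rw [refLoop, refVal, refVal, ih]
    by_cases h1 : PySem.Str.isIn p r1 = true <;> by_cases h2 : PySem.Str.isIn p r2 = true <;>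
      simp only [h1, h2, Bool.not_true, Bool.not_false, Bool.and_true, Bool.and_false,
        if_pos, one_mul, zero_mul, zero_add, Bool.false_eq_true, if_false] <;>
      split_ifs <;> omega

-- ===== VERDICT (by name: the statement is the Claim_ definition above) =====
theorem reference_sort_spec : Claim_equal_reference_sort := by
  intro r1 r2 _
  unfold Spec_reference_sort reference_sort reference_sort_alt refScore
  rw [foldl_refVal, foldl_refVal]
  simpa using refLoop_eq_val refPatterns r1 r2
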